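-- pv_equiv track=rewrite | github.com/RobokopU24/ORION | orion/utils.py | chunk_iterator
-- ===== SOURCE A (Python) =====
-- from itertools import islice
--
-- def chunk_iterator(iterable, chunk_size):
--     iterator = iter(iterable)
--     while True:
--         chunk = list(islice(iterator, chunk_size))
--         if chunk:
--             yield chunk
--         else:
--             break
-- ===== SOURCE B (Python) =====
-- def chunk_iterator(iterable, chunk_size):
--     if chunk_size < 0:
--         raise ValueError("chunk_size must be non-negative")
--     if chunk_size == 0:
--         return
--     buffer = []
--     for item in iterable:
--         buffer.append(item)
--         if len(buffer) == chunk_size: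
--             yield buffer
--             buffer = []
--     if buffer:
--         yield buffer
-- ===== Notes on version B (the rewrite author's own statement) =====
-- stated objective: alternative
-- what changed: B replaces islice's repeated batch slicing with a single element-by-element pass that accumulates a buffer and yields it whenever it fills (plus the non-empty tail), with an up-front guard for chunk_size <= 0.
import Mathlib
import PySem

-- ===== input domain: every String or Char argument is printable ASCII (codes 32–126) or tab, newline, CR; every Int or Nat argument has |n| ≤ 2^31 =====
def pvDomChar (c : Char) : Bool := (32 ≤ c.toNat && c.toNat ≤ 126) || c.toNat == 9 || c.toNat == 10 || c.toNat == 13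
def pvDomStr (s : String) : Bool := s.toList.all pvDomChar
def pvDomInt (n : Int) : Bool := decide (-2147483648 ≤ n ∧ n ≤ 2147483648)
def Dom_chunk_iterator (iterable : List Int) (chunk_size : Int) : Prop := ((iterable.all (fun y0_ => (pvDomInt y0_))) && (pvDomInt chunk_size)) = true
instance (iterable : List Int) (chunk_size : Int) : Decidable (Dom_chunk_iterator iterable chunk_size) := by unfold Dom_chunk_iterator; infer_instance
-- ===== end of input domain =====

-- B replaces islice batch slicing with a single buffered pass; return-value equivalence on chunk_size >= 0 (A raises ValueError for negative chunk_size, and so does B).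
-- ===== PORT A =====
-- while True: chunk = list(islice(iterator, chunk_size)); if chunk: yield chunk else: break
-- chunk_size.toNat is safe: Pre_ gives 0 <= chunk_size (islice raises on negative).
def chunk_iterator (iterable : List Int) (chunk_size : Int) : List (List Int) :=
  if h : iterable.take chunk_size.toNat = [] then []
  else iterable.take chunk_size.toNat :: chunk_iterator (iterable.drop chunk_size.toNat) chunk_size
termination_by iterable.length
decreasing_by
  rw [List.take_eq_nil_iff] at h
  push_neg at h
  have hlen : 0 < iterable.length := List.length_pos_iff.mpr h.2
  have hn : chunk_size.toNat ≠ 0 := h.1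
  simp only [List.length_drop]
  omega

-- ===== PORT B =====
-- the for-loop: buffer accumulation, yield when full, yield non-empty tail at the end
def chunkB_loop (xs : List Int) (buf : List Int) (n : Nat) : List (List Int) :=
  match xs with
  | [] => if buf = [] then [] else [buf]
  | x :: rest =>
    let buf' := buf ++ [x]
    if buf'.length = n then buf' :: chunkB_loop rest [] n
    else chunkB_loop rest buf' n

def chunk_iterator_alt (iterable : List Int) (chunk_size : Int) : List (List Int) :=
  if chunk_size = 0 then [] else chunkB_loop iterable [] chunk_size.toNat

-- ===== PRECONDITION & SPEC =====
-- A raises ValueError (from islice) when chunk_size is negative; B raises there too.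
def Pre_chunk_iterator (iterable : List Int) (chunk_size : Int) : Prop := 0 ≤ chunk_size
instance (iterable : List Int) (chunk_size : Int) : Decidable (Pre_chunk_iterator iterable chunk_size) := by unfold Pre_chunk_iterator; infer_instance
def pvWitness_chunk_iterator : List Int × Int := ([1, 2, 3, 4, 5], 2)
def Spec_chunk_iterator (iterable : List Int) (chunk_size : Int) (out : List (List Int)) : Prop := out = chunk_iterator_alt iterable chunk_size
instance (iterable : List Int) (chunk_size : Int) (out : List (List Int)) : Decidable (Spec_chunk_iterator iterable chunk_size out) := by unfold Spec_chunk_iterator; infer_instance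

-- ===== CLAIM (what is proved, stated in full; the proofs are below) =====
def Claim_equal_chunk_iterator : Prop := ∀ (iterable : List Int) (chunk_size : Int), Dom_chunk_iterator iterable chunk_size → Pre_chunk_iterator iterable chunk_size → Spec_chunk_iterator iterable chunk_size (chunk_iterator iterable chunk_size)

-- ===== LEMMAS AND PROOFS =====

theorem chunkB_loop_eq (n : Nat) (hn : 0 < n) :
    ∀ (xs buf : List Int), buf.length < n →
      chunkB_loop xs buf n = chunk_iterator (buf ++ xs) (Int.ofNat n) := by
  intro xs
  induction xs with
  | nil =>
    intro buf hb
    rw [chunk_iterator.eq_def]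
    simp only [List.append_nil, chunkB_loop]
    have htake : (buf.take (Int.ofNat n).toNat) = buf := by
      apply List.take_of_length_le
      simp [Int.toNat_natCast]; omega
    rw [htake]
    by_cases hbuf : buf = []
    · simp [hbuf]
    · rw [if_neg hbuf, dif_neg hbuf, chunk_iterator.eq_def]
      simp
      omega
  | cons x rest ih =>
    intro buf hb
    rw [chunkB_loop]
    by_cases hfull : (buf ++ [x]).length = n
    · rw [if_pos hfull]
      rw [ih [] (by simpa using hn)]
      conv_rhs => rw [chunk_iterator.eq_def]
      have hsplit : buf ++ x :: rest = (buf ++ [x]) ++ rest := by simp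
      have htoNat : (Int.ofNat n).toNat = n := Int.toNat_natCast n
      have htake : (buf ++ x :: rest).take (Int.ofNat n).toNat = buf ++ [x] := by
        rw [hsplit, htoNat, ← hfull, List.take_left]
      have hdrop : (buf ++ x :: rest).drop (Int.ofNat n).toNat = rest := by
        rw [hsplit, htoNat, ← hfull, List.drop_left]
      rw [htake, hdrop]
      have hne : buf ++ [x] ≠ [] := by simp
      rw [dif_neg hne]
      simp
    · rw [if_neg hfull]
      have hlt : (buf ++ [x]).length < n := by
        simp only [List.length_append, List.length_cons, List.length_nil] at *
        omega
      rw [ih (buf ++ [x]) hlt]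
      simp

-- ===== VERDICT (by name: the statement is the Claim_ definition above) =====
theorem chunk_iterator_spec : Claim_equal_chunk_iterator := by
  intro iterable chunk_size _ hpre
  unfold Spec_chunk_iterator chunk_iterator_alt
  by_cases h0 : chunk_size = 0
  · subst h0
    rw [if_pos rfl, chunk_iterator]
    simp
  · rw [if_neg h0]
    have hpos : 0 < chunk_size.toNat := by
      unfold Pre_chunk_iterator at hpre; omega
    have := chunkB_loop_eq chunk_size.toNat hpos iterable [] (by simpa using hpos)
    simp only [List.nil_append] at this
    rw [this]
    congr 1
    unfold Pre_chunk_iterator at hpre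
    symm; exact_mod_cast Int.toNat_of_nonneg hpre
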